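-- pv_equiv track=rewrite | github.com/Vedqiibyol/MarkRight | previous/_main-2022-10-31.py | ParseQuoteStart
-- ===== SOURCE A (Python) =====
-- def StrMatch(txt, pos, target):
-- 	return txt[pos:pos+len(target)] == target
--
-- def ParseQuoteStart(text, pos):
-- 	count = 0
-- 	inc   = 0
-- 	qbr   = False
--
-- 	while StrMatch(text, pos, '> '):
-- 		count += 1
-- 		inc   += 2
-- 		pos   += 2
--
-- 	if StrMatch(text, pos, '>\n'):
-- 		count += 1
-- 		inc   += 1
-- 		qbr    = True
--
-- 	return (count, inc, qbr)
-- ===== SOURCE B (Python) =====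
-- def ParseQuoteStart(text, pos):
-- 	if pos < 0:
-- 		return (0, 0, False)
-- 	s = text[pos:]
-- 	# longest common prefix of s with the periodic reference pattern '> > > ...'
-- 	pattern = '> ' * (len(s) // 2 + 1)
-- 	m = next((i for i, (a, b) in enumerate(zip(s, pattern)) if a != b), len(s))
-- 	n = m // 2
-- 	q = s[2 * n:2 * n + 2] == '>\n'
-- 	return (n + q, 2 * n + q, q)
-- ===== Notes on version B (the rewrite author's own statement) =====
-- stated objective: alternative
-- what changed: B replaces A's while-loop of repeated 2-char slice comparisons by a single common-prefix computation: it builds the periodic reference string '> '*(len//2+1), takes the length m of the longest common prefix of text[pos:] with it, and assembles the answer arithmetically from n=m//2 plus one final '>\n' check.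
-- intended difference: On pos <= -3 with a quote marker at the wrapped index len(text)+pos, A's Python slicing wraps to the end of the text and counts markers there (e.g. ParseQuoteStart('> x', -3) = (1, 2, False)); B returns (0, 0, False), the intended value for a parser position that is not inside the text. — e.g. on ParseQuoteStart("> x", -3): A returns (1, 2, false), B returns (0, 0, false)
import Mathlib
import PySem

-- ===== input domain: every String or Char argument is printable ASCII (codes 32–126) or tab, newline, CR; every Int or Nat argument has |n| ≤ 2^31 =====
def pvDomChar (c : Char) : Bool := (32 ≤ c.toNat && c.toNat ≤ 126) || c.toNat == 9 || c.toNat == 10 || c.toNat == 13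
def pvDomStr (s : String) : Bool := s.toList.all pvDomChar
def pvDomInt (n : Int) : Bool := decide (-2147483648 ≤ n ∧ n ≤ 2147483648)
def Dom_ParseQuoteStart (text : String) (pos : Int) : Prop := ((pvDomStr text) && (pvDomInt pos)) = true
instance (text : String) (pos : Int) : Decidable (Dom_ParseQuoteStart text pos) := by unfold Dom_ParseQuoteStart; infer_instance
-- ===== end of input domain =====

-- B swaps A's marker-by-marker slice-comparison loop for one common-prefix computation
-- against the periodic reference string '> > > …' plus arithmetic on its length; on
-- negative pos (where A's slicing wraps around) B reports no markers — see
-- D_ParseQuoteStart below. Objective: alternative.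

-- ===== PORT A =====
-- StrMatch txt pos target  =  txt[pos:pos+len(target)] == target
def StrMatch (txt : List Char) (pos : Int) (target : List Char) : Bool :=
  PySem.List.slice txt (some pos) (some (pos + (target.length : Int))) == target

-- the while-loop of A: state (count, inc, pos); fuel only makes the recursion
-- structural (len+2 steps always suffice: matching positions strictly increase)
def pqsLoopA (txt : List Char) : Nat → Int → Int → Int → Int × Int × Int
  | 0, count, inc, pos => (count, inc, pos)
  | fuel + 1, count, inc, pos =>
    if StrMatch txt pos ['>', ' '] then pqsLoopA txt fuel (count + 1) (inc + 2) (pos + 2)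
    else (count, inc, pos)

def ParseQuoteStart (text : String) (pos : Int) : Int × Int × Bool :=
  match pqsLoopA text.toList (text.toList.length + 2) 0 0 pos with
  | (count, inc, p) =>
    if StrMatch text.toList p ['>', '\n'] then (count + 1, inc + 1, true)
    else (count, inc, false)

-- ===== PORT B =====
-- next((i for i, (a, b) in enumerate(zip(s, pattern)) if a != b), default): first
-- mismatch index of the zipped pair list, none if the generator is exhausted
def pqsScan : List (Char × Char) → Nat → Option Nat
  | [], _ => none
  | (a, b) :: rest, i => if a ≠ b then some i else pqsScan rest (i + 1)

-- '> ' * k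
def pqsPattern (k : Nat) : List Char := (List.replicate k ['>', ' ']).flatten

def ParseQuoteStart_alt (text : String) (pos : Int) : Int × Int × Bool :=
  if pos < 0 then (0, 0, false)
  else
    let s := PySem.List.slice text.toList (some pos) none
    let m := (pqsScan (s.zip (pqsPattern (s.length / 2 + 1))) 0).getD s.length
    let n : Nat := m / 2
    let q := PySem.List.slice s (some (2 * (n : Int))) (some (2 * (n : Int) + 2)) == ['>', '\n']
    ((n : Int) + (if q then 1 else 0), 2 * (n : Int) + (if q then 1 else 0), q)

-- ===== PRECONDITION & SPEC =====
-- On pos ≤ -3 with a quote marker at the wrapped-around index len(text)+pos, A's Python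
-- slicing matches from the END of the text and counts markers there (e.g. ('> x', -3) ↦
-- (1, 2, False)); B returns (0, 0, False), the intended value for a parser position
-- that is not inside the text.
def D_ParseQuoteStart (text : String) (pos : Int) : Prop :=
  -(text.toList.length : Int) ≤ pos ∧ pos ≤ -3 ∧
  text.toList.getD ((text.toList.length : Int) + pos).toNat ' ' = '>' ∧
  (text.toList.getD (((text.toList.length : Int) + pos).toNat + 1) ' ' = ' ' ∨
   text.toList.getD (((text.toList.length : Int) + pos).toNat + 1) ' ' = '\n')
instance (text : String) (pos : Int) : Decidable (D_ParseQuoteStart text pos) := by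
  unfold D_ParseQuoteStart; infer_instance

def Spec_ParseQuoteStart (text : String) (pos : Int) (out : Int × Int × Bool) : Prop :=
  ¬ D_ParseQuoteStart text pos → out = ParseQuoteStart_alt text pos
instance (text : String) (pos : Int) (out : Int × Int × Bool) : Decidable (Spec_ParseQuoteStart text pos out) := by
  unfold Spec_ParseQuoteStart; infer_instance

def pvDiffWitness_ParseQuoteStart : String × Int := ("> x", -3)
def pvDiffWitnessOut_ParseQuoteStart : (Int × Int × Bool) × (Int × Int × Bool) :=
  ((1, 2, false), (0, 0, false))

-- ===== CLAIM (what is proved, stated in full; the proofs are below) =====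
def Claim_unchanged_ParseQuoteStart : Prop := ∀ (text : String) (pos : Int), Dom_ParseQuoteStart text pos → Spec_ParseQuoteStart text pos (ParseQuoteStart text pos)
def Claim_changed_ParseQuoteStart : Prop := Dom_ParseQuoteStart (pvDiffWitness_ParseQuoteStart.1) (pvDiffWitness_ParseQuoteStart.2) ∧ D_ParseQuoteStart (pvDiffWitness_ParseQuoteStart.1) (pvDiffWitness_ParseQuoteStart.2) ∧ ParseQuoteStart (pvDiffWitness_ParseQuoteStart.1) (pvDiffWitness_ParseQuoteStart.2) = pvDiffWitnessOut_ParseQuoteStart.1 ∧ ParseQuoteStart_alt (pvDiffWitness_ParseQuoteStart.1) (pvDiffWitness_ParseQuoteStart.2) = pvDiffWitnessOut_ParseQuoteStart.2 ∧ pvDiffWitnessOut_ParseQuoteStart.1 ≠ pvDiffWitnessOut_ParseQuoteStart.2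
def Claim_exact_ParseQuoteStart : Prop := ∀ (text : String) (pos : Int), Dom_ParseQuoteStart text pos → D_ParseQuoteStart text pos → ParseQuoteStart text pos ≠ ParseQuoteStart_alt text pos

-- ===== LEMMAS AND PROOFS =====

-- a 2-element take of a drop, characterised by getD
theorem take2_drop_eq (txt : List Char) (k : Nat) (c1 c2 : Char) :
    ((txt.drop k).take 2 = [c1, c2]) ↔
      (k + 2 ≤ txt.length ∧ txt.getD k ' ' = c1 ∧ txt.getD (k + 1) ' ' = c2) := by
  have hlen : (txt.drop k).length = txt.length - k := List.length_drop ..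
  have g0 : txt.getD k ' ' = ((txt.drop k)[0]?).getD ' ' := by
    rw [List.getD_eq_getElem?_getD]; simp
  have g1 : txt.getD (k+1) ' ' = ((txt.drop k)[1]?).getD ' ' := by
    rw [List.getD_eq_getElem?_getD]; simp
  rcases hl : txt.drop k with _ | ⟨a, _ | ⟨b, t⟩⟩ <;> rw [hl] at hlen g0 g1
  · constructor
    · intro h; simp at h
    · rintro ⟨h, -⟩; exfalso; simp at hlen; omega
  · constructor
    · intro h; simp at h
    · rintro ⟨h, -⟩; exfalso; simp at hlen; omega
  · have hk : k ≤ txt.length := by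
      by_contra hc
      rw [List.drop_eq_nil_of_le (by omega)] at hl; cases hl
    simp only [List.getElem?_cons_zero, List.getElem?_cons_succ, Option.getD_some] at g0 g1
    rw [g0, g1]
    constructor
    · intro h
      injection h with e1 h; injection h with e2 _
      exact ⟨by simp at hlen; omega, e1, e2⟩
    · rintro ⟨-, e1, e2⟩
      simp [e1, e2]

-- A's 2-char window test at a Nat position is a take-2 of a drop
theorem strMatch_natCast (txt : List Char) (k : Nat) (c1 c2 : Char) :
    StrMatch txt (k : Int) [c1, c2] = ((txt.drop k).take 2 == [c1, c2]) := by
  unfold StrMatch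
  rw [show (([c1, c2] : List Char).length : Int) = ((2 : Nat) : Int) by simp,
    PySem.List.slice_natCast_add]

-- A's window test at a negative position: Python slicing wraps to index len+p
theorem strMatch_neg (txt : List Char) (p : Int) (hp : p < 0) (c1 c2 : Char) :
    StrMatch txt p [c1, c2] = true ↔
      (p ≤ -3 ∧ 0 ≤ (txt.length : Int) + p ∧
       txt.getD ((txt.length : Int) + p).toNat ' ' = c1 ∧
       txt.getD (((txt.length : Int) + p).toNat + 1) ' ' = c2) := by
  unfold StrMatch
  simp only [beq_iff_eq, List.length_cons, List.length_nil]
  rw [show ((0 + 1 + 1 : Nat) : Int) = 2 by norm_num]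
  simp only [PySem.List.slice, PySem.List.clampIdx]
  by_cases h3 : p ≤ -3
  · by_cases hL : 0 ≤ (txt.length : Int) + p
    · rw [if_pos hp, if_neg (show ¬((txt.length : Int) + p < 0) by omega),
        if_pos (show p + 2 < 0 by omega),
        if_neg (show ¬((txt.length : Int) + (p + 2) < 0) by omega)]
      have ha : ((txt.length : Int) + (p + 2)).toNat = ((txt.length : Int) + p).toNat + 2 := by omega
      rw [ha, show ((txt.length : Int) + p).toNat + 2 - ((txt.length : Int) + p).toNat = 2 by omega]
      rw [take2_drop_eq]
      constructor
      · rintro ⟨h1, h2, h4⟩; exact ⟨h3, hL, h2, h4⟩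
      · rintro ⟨-, -, h2, h4⟩
        refine ⟨?_, h2, h4⟩; omega
    · rw [if_pos hp, if_pos (show (txt.length : Int) + p < 0 by omega),
        if_pos (show p + 2 < 0 by omega)]
      constructor
      · intro h
        by_cases hs : (txt.length : Int) + (p + 2) < 0
        · rw [if_pos hs] at h; simp at h
        · rw [if_neg hs] at h
          have : ((txt.length : Int) + (p + 2)).toNat ≤ 2 := by omega
          have hlen := congrArg List.length h
          simp at hlen; omega
      · rintro ⟨-, h, -⟩; exact absurd h hL
  · constructor
    · intro h
      rw [if_pos hp] at h
      have hlen := congrArg List.length h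
      simp only [List.length_take, List.length_drop, List.length_cons, List.length_nil] at hlen
      split_ifs at h hlen <;> omega
    · rintro ⟨h, -⟩; omega

-- the number of leading '> ' pairs of a character list (the quantity both programs compute)
def pairs : List Char → Nat
  | a :: b :: t => if a = '>' then (if b = ' ' then pairs t + 1 else 0) else 0
  | _ => 0

-- two-step structural induction on lists of characters
def listTwoStep {motive : List Char → Prop} (h0 : motive []) (h1 : ∀ a, motive [a])
    (h2 : ∀ a b t, motive t → motive (a :: b :: t)) : ∀ s, motive s
  | [] => h0
  | [a] => h1 a
  | a :: b :: t => h2 a b t (listTwoStep h0 h1 h2 t)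

theorem pairs_le (s : List Char) : pairs s ≤ s.length := by
  induction s using listTwoStep with
  | h0 => simp [pairs]
  | h1 a => simp [pairs]
  | h2 a b t ih =>
    simp only [pairs, List.length_cons]
    split_ifs <;> omega

-- B's mismatch scan with a shifted start index
theorem pqsScan_shift (l : List (Char × Char)) (i : Nat) :
    pqsScan l i = (pqsScan l 0).map (· + i) := by
  induction l generalizing i with
  | nil => rfl
  | cons p rest ih =>
    rcases p with ⟨a, b⟩
    simp only [pqsScan]
    by_cases h : a ≠ b
    · simp [h]
    · rw [if_neg h, if_neg h, ih (i + 1), ih 1]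
      cases pqsScan rest 0
      · simp
      · simp
        omega

-- B's common-prefix length, halved, is exactly the leading-pair count
theorem scan_pairs (s : List Char) :
    ((pqsScan (s.zip (pqsPattern (s.length / 2 + 1))) 0).getD s.length) / 2 = pairs s := by
  induction s using listTwoStep with
  | h0 => simp [pairs, pqsScan]
  | h1 a =>
    have hpat : pqsPattern (([a] : List Char).length / 2 + 1) = ['>', ' '] := by
      simp [pqsPattern]
    rw [hpat]
    by_cases ha : a = '>'
    · simp [pqsScan, ha, pairs]
    · simp [pqsScan, ha, pairs]
  | h2 a b t ih =>
    have hpat : pqsPattern ((a :: b :: t).length / 2 + 1)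
        = '>' :: ' ' :: pqsPattern (t.length / 2 + 1) := by
      rw [show (a :: b :: t).length / 2 + 1 = (t.length / 2 + 1) + 1 by
        simp only [List.length_cons]; omega]
      simp [pqsPattern, List.replicate_succ]
    rw [hpat]
    simp only [List.zip_cons_cons, pqsScan]
    by_cases ha : a = '>'
    · rw [if_neg (by simp [ha]), pairs, if_pos ha]
      by_cases hb : b = ' '
      · rw [if_neg (by simp [hb]), if_pos hb,
          pqsScan_shift (t.zip (pqsPattern (t.length / 2 + 1))) 2]
        cases hs : pqsScan (t.zip (pqsPattern (t.length / 2 + 1))) 0 with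
        | none =>
          rw [hs] at ih
          simp only [Option.map_none, Option.getD_none, List.length_cons]
          simp only [Option.getD_none] at ih
          omega
        | some v =>
          rw [hs] at ih
          simp only [Option.map_some, Option.getD_some]
          simp only [Option.getD_some] at ih
          omega
      · rw [if_pos (by simp [hb]), if_neg hb]
        simp
    · rw [if_pos (by simp [ha]), pairs, if_neg ha]
      simp

-- ¬('> ' at the front) means no leading pair
theorem pairs_eq_zero (s : List Char) (h : ¬ s.take 2 = ['>', ' ']) : pairs s = 0 := by
  cases s with
  | nil => rfl
  | cons a t =>
    cases t with
    | nil => rfl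
    | cons b u =>
      by_cases ha : a = '>'
      · by_cases hb : b = ' '
        · exact absurd (by rw [ha, hb]; simp) h
        · simp [pairs, ha, hb]
      · simp [pairs, ha]

-- A's loop computes the leading-pair count of the suffix at its start position
theorem loopA_pairs (txt : List Char) (fuel : Nat) :
    ∀ (k : Nat) (c i : Int), pairs (txt.drop k) < fuel →
      pqsLoopA txt fuel c i (k : Int) =
        (c + (pairs (txt.drop k) : Int), i + 2 * (pairs (txt.drop k) : Int),
         (k : Int) + 2 * (pairs (txt.drop k) : Int)) := by
  induction fuel with
  | zero => intro k c i h; omega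
  | succ f ih =>
    intro k c i h
    simp only [pqsLoopA]
    rw [strMatch_natCast]
    by_cases hm : (txt.drop k).take 2 = ['>', ' ']
    · rcases hd : txt.drop k with _ | ⟨a, _ | ⟨b, t⟩⟩ <;> rw [hd] at hm h <;> try simp at hm
      obtain ⟨rfl, rfl⟩ := hm
      have hd2 : txt.drop (k + 2) = t := by
        have h' := congrArg (List.drop 2) hd
        rw [List.drop_drop] at h'
        simpa [show 2 + k = k + 2 by omega] using h'
      rw [if_pos (by simp)]
      rw [show ((k : Int) + 2) = ((k + 2 : Nat) : Int) by push_cast; ring,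
        ih (k + 2) (c + 1) (i + 2) (by rw [hd2]; simp [pairs] at h; omega),
        hd2]
      simp [pairs]
      omega
    · rw [if_neg (by simpa using hm), pairs_eq_zero _ hm]
      simp

-- A's loop never decreases the count
theorem pqsLoopA_count_le (txt : List Char) (fuel : Nat) (count inc p : Int) :
    count ≤ (pqsLoopA txt fuel count inc p).1 := by
  induction fuel generalizing count inc p with
  | zero => simp [pqsLoopA]
  | succ f ih =>
    simp only [pqsLoopA]
    by_cases h : StrMatch txt p ['>', ' '] = true
    · rw [if_pos h]
      have := ih (count + 1) (inc + 2) (p + 2)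
      omega
    · rw [if_neg h]

-- ===== VERDICT (by name: the statement is the Claim_ definition above) =====
theorem ParseQuoteStart_spec : Claim_unchanged_ParseQuoteStart := by
  intro text pos _ hnd
  show ParseQuoteStart text pos = ParseQuoteStart_alt text pos
  by_cases hp : pos < 0
  · -- negative position: A matches nothing (else D_ would hold); B returns (0,0,false)
    have hA1 : ¬ StrMatch text.toList pos ['>', ' '] = true := by
      intro hc
      rw [strMatch_neg text.toList pos hp] at hc
      exact hnd ⟨by omega, hc.1, hc.2.2.1, Or.inl hc.2.2.2⟩
    have hA2 : ¬ StrMatch text.toList pos ['>', '\n'] = true := by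
      intro hc
      rw [strMatch_neg text.toList pos hp] at hc
      exact hnd ⟨by omega, hc.1, hc.2.2.1, Or.inr hc.2.2.2⟩
    have hloop : pqsLoopA text.toList (text.toList.length + 2) 0 0 pos = (0, 0, pos) := by
      rw [show text.toList.length + 2 = (text.toList.length + 1) + 1 from rfl]
      simp only [pqsLoopA]
      rw [if_neg hA1]
    simp only [ParseQuoteStart, ParseQuoteStart_alt, hloop, if_neg hA2, if_pos hp]
  · -- nonnegative position
    have h0 : 0 ≤ pos := by omega
    obtain ⟨k, rfl⟩ := Int.eq_ofNat_of_zero_le h0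
    have hs : PySem.List.slice text.toList (some ((k : Nat) : Int)) none = text.toList.drop k :=
      PySem.List.slice_from_natCast ..
    have hnp : ((pqsScan ((text.toList.drop k).zip
          (pqsPattern ((text.toList.drop k).length / 2 + 1))) 0).getD
          (text.toList.drop k).length) / 2 = pairs (text.toList.drop k) :=
      scan_pairs _
    have hfuel : pairs (text.toList.drop k) < text.toList.length + 2 := by
      have h1 := pairs_le (text.toList.drop k)
      have h2 : (text.toList.drop k).length ≤ text.toList.length := by simp
      omega
    have hloop := loopA_pairs text.toList (text.toList.length + 2) k 0 0 hfuel
    have hq : (PySem.List.slice (text.toList.drop k)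
          (some (2 * ((pairs (text.toList.drop k)) : Int)))
          (some (2 * ((pairs (text.toList.drop k)) : Int) + 2)) == ['>', '\n'])
        = StrMatch text.toList ((k : Int) + 2 * ((pairs (text.toList.drop k)) : Int)) ['>', '\n'] := by
      rw [show (2 * ((pairs (text.toList.drop k)) : Int))
            = ((2 * pairs (text.toList.drop k) : Nat) : Int) by push_cast; ring]
      rw [show ((2 * pairs (text.toList.drop k) : Nat) : Int) + 2
            = ((2 * pairs (text.toList.drop k) : Nat) : Int) + ((2 : Nat) : Int) by norm_num]
      rw [PySem.List.slice_natCast_add]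
      rw [show ((k : Int) + ((2 * pairs (text.toList.drop k) : Nat) : Int))
            = ((k + 2 * pairs (text.toList.drop k) : Nat) : Int) by push_cast; ring]
      rw [strMatch_natCast]
      rw [List.drop_drop]
    simp only [ParseQuoteStart, ParseQuoteStart_alt, if_neg hp, hloop, hs, hnp, hq]
    cases hb : StrMatch text.toList
        ((k : Int) + 2 * ((pairs (text.toList.drop k)) : Int)) ['>', '\n']
    · simp
    · simp


theorem ParseQuoteStart_changed : Claim_changed_ParseQuoteStart := by
  unfold Claim_changed_ParseQuoteStart
  refine ⟨by decide, by decide, by decide, by decide, by decide⟩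

theorem ParseQuoteStart_tight : Claim_exact_ParseQuoteStart := by
  intro text pos _ hd heq
  obtain ⟨h1, h2, h3, h4⟩ := hd
  have hneg : pos < 0 := by omega
  have hB : ParseQuoteStart_alt text pos = (0, 0, false) := by
    unfold ParseQuoteStart_alt
    rw [if_pos hneg]
  rw [hB] at heq
  by_cases hsp : text.toList.getD (((text.toList.length : Int) + pos).toNat + 1) ' ' = ' '
  · -- first window is '> ': A's count is at least 1
    have hm : StrMatch text.toList pos ['>', ' '] = true := by
      rw [strMatch_neg text.toList pos hneg]
      exact ⟨h2, by omega, h3, hsp⟩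
    have hcnt : 1 ≤ (pqsLoopA text.toList (text.toList.length + 2) 0 0 pos).1 := by
      rw [show text.toList.length + 2 = (text.toList.length + 1) + 1 from rfl]
      simp only [pqsLoopA]
      rw [if_pos hm]
      exact pqsLoopA_count_le text.toList (text.toList.length + 1) 1 2 (pos + 2)
    rcases hE : pqsLoopA text.toList (text.toList.length + 2) 0 0 pos with ⟨c, i, p⟩
    rw [hE] at hcnt
    simp only at hcnt
    simp only [ParseQuoteStart, hE] at heq
    split_ifs at heq <;>
      · have := congrArg (fun t => t.1) heq
        simp only at this
        omega
  · -- first window is '>\n': A returns (1, 1, True)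
    have h4n : text.toList.getD (((text.toList.length : Int) + pos).toNat + 1) ' ' = '\n' := by
      rcases h4 with h | h
      · exact absurd h hsp
      · exact h
    have hm1 : ¬ StrMatch text.toList pos ['>', ' '] = true := by
      intro hc
      rw [strMatch_neg text.toList pos hneg] at hc
      exact hsp hc.2.2.2
    have hm2 : StrMatch text.toList pos ['>', '\n'] = true := by
      rw [strMatch_neg text.toList pos hneg]
      exact ⟨h2, by omega, h3, h4n⟩
    have hloop : pqsLoopA text.toList (text.toList.length + 2) 0 0 pos = (0, 0, pos) := by
      rw [show text.toList.length + 2 = (text.toList.length + 1) + 1 from rfl]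
      simp only [pqsLoopA]
      rw [if_neg hm1]
    simp only [ParseQuoteStart, hloop, if_pos hm2] at heq
    exact absurd (congrArg (fun t => t.2.2) heq) (by simp)
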